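-- pv_equiv track=rewrite | github.com/SainanLuo/multiMotif | multiMotif/main.py | remove_overlapping_lists_by_length
-- ===== SOURCE A (Python) =====
-- def remove_overlapping_lists_by_length(list_of_lists):
--
--     sorted_lists = sorted(list_of_lists, key=len, reverse=True)
--     result = []
--
--     while sorted_lists:
--         longest = sorted_lists.pop(0)
--         result.append(longest)
--         sorted_lists = [
--             lst for lst in sorted_lists
--             if not any(d in longest for d in lst)]
--
--     return result
-- ===== SOURCE B (Python) =====
-- def remove_overlapping_lists_by_length(list_of_lists):
--     result = []
--     used = []
--     for lst in sorted(list_of_lists, key=len, reverse=True):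
--         if not any(d in used for d in lst):
--             result.append(lst)
--             used.extend(lst)
--     return result
-- ===== Notes on version B (the rewrite author's own statement) =====
-- stated objective: alternative
-- what changed: Replaces A's while-loop that pops the longest and rebuilds the remaining list by re-filtering it after every kept list with a single forward pass over the sorted lists that maintains an accumulated 'used' element list and tests each candidate against it once.
import Mathlib
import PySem

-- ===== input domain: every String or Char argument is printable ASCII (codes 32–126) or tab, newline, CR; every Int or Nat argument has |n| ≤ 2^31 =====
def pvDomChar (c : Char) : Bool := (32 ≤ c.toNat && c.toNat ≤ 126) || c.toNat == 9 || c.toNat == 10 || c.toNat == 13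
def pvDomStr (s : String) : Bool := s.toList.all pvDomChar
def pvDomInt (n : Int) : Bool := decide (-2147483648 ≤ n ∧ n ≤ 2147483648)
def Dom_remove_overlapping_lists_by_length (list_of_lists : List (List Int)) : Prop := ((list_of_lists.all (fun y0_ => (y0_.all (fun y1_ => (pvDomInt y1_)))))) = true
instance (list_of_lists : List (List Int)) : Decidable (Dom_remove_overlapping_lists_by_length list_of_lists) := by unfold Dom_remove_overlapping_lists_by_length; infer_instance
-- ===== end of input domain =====

-- B replaces A's pop-and-refilter while loop with one forward pass over the sorted
-- lists keeping an accumulated list of used elements (objective: alternative decomposition).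

-- ===== PORT A =====
-- A's while loop: pop the head, keep it, and rebuild the remaining list by
-- filtering out every list that shares an element with the kept one.
def pvALoop : List (List Int) → List (List Int)
  | [] => []
  | longest :: rest =>
      longest :: pvALoop (rest.filter (fun lst => !(lst.any (fun d => longest.contains d))))
termination_by xs => xs.length
decreasing_by
  simp only [List.length_cons, List.length_unattach]
  exact Nat.lt_succ_of_le ((List.length_filter_le _ _).trans (by simp))

def remove_overlapping_lists_by_length (list_of_lists : List (List Int)) : List (List Int) :=
  pvALoop (PySem.List.sorted list_of_lists (fun l => (l.length : Int)) true)

-- ===== PORT B =====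
-- B's single pass: fold over the sorted lists with state (result, used).
def pvBStep (st : List (List Int) × List Int) (lst : List Int) : List (List Int) × List Int :=
  if lst.any (fun d => st.2.contains d) then st else (st.1 ++ [lst], st.2 ++ lst)

def remove_overlapping_lists_by_length_alt (list_of_lists : List (List Int)) : List (List Int) :=
  ((PySem.List.sorted list_of_lists (fun l => (l.length : Int)) true).foldl pvBStep ([], [])).1

-- ===== PRECONDITION & SPEC =====
def Spec_remove_overlapping_lists_by_length (list_of_lists : List (List Int)) (out : List (List Int)) : Prop := out = remove_overlapping_lists_by_length_alt list_of_lists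
instance (list_of_lists : List (List Int)) (out : List (List Int)) : Decidable (Spec_remove_overlapping_lists_by_length list_of_lists out) := by unfold Spec_remove_overlapping_lists_by_length; infer_instance

-- ===== CLAIM (what is proved, stated in full; the proofs are below) =====
def Claim_equal_remove_overlapping_lists_by_length : Prop := ∀ (list_of_lists : List (List Int)), Dom_remove_overlapping_lists_by_length list_of_lists → Spec_remove_overlapping_lists_by_length list_of_lists (remove_overlapping_lists_by_length list_of_lists)

-- ===== LEMMAS AND PROOFS =====

theorem pvALoop_cons (longest : List Int) (rest : List (List Int)) :
    pvALoop (longest :: rest)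
      = longest :: pvALoop (rest.filter (fun lst => !(lst.any (fun d => longest.contains d)))) := by
  rw [pvALoop]

-- a candidate overlaps 'used ++ l' iff it overlaps 'used' or overlaps 'l'
theorem pv_pred (l used lst : List Int) :
    (!(lst.any fun d => (used ++ l).contains d))
      = ((!(lst.any fun d => used.contains d)) && (!(lst.any fun d => l.contains d))) := by
  rw [Bool.eq_iff_iff]
  simp [not_or]
  exact ⟨fun h => ⟨fun x hx => (h x hx).1, fun x hx => (h x hx).2⟩,
    fun h x hx => ⟨h.1 x hx, h.2 x hx⟩⟩

-- main invariant: the fold starting from (res, used) returns res followed by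
-- A's loop applied to the candidates not overlapping 'used'
theorem pv_fold_eq (xs : List (List Int)) : ∀ (res : List (List Int)) (used : List Int),
    (xs.foldl pvBStep (res, used)).1
      = res ++ pvALoop (xs.filter (fun lst => !(lst.any (fun d => used.contains d)))) := by
  induction xs with
  | nil => intro res used; simp [pvALoop]
  | cons l xs ih =>
    intro res used
    rw [List.foldl_cons]
    by_cases h : l.any (fun d => used.contains d) = true
    · have hs : pvBStep (res, used) l = (res, used) := by
        unfold pvBStep; rw [if_pos h]
      rw [hs, ih, List.filter_cons_of_neg (by simpa using h)]
    · have hb : (l.any (fun d => used.contains d)) = false := by simpa using h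
      have hs : pvBStep (res, used) l = (res ++ [l], used ++ l) := by
        unfold pvBStep; rw [if_neg (by simpa using hb)]
      rw [hs, ih, List.filter_cons_of_pos (by simpa using hb), pvALoop_cons,
        List.append_assoc, List.singleton_append]
      congr 2
      rw [List.filter_filter]
      congr 1
      apply List.filter_congr
      intro lst _
      rw [pv_pred, Bool.and_comm]

-- ===== VERDICT (by name: the statement is the Claim_ definition above) =====
theorem remove_overlapping_lists_by_length_spec : Claim_equal_remove_overlapping_lists_by_length := by
  intro l _
  unfold Spec_remove_overlapping_lists_by_length remove_overlapping_lists_by_length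
    remove_overlapping_lists_by_length_alt
  rw [pv_fold_eq]
  have ht : (fun (lst : List Int) => !(lst.any fun d => ([] : List Int).contains d))
      = fun _ => true := by funext lst; simp
  rw [ht, List.filter_true, List.nil_append]
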